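-- pv_equiv track=rewrite | github.com/terilios/file-upload-embeddings | app/rag/answer_fusion.py | generate_system_message
-- ===== SOURCE A (Python) =====
-- def generate_system_message(query: str) -> str:
--     """
--     Generate appropriate system message based on query type.
--     """
--     # Base system message
--     base_message = (
--         "You are a helpful AI assistant that provides accurate and relevant "
--         "information based on the given context. "
--         "Your responses should be:"
--     )
--
--     # Detect query type and customize message
--     query = query.lower()
--
--     if any(word in query for word in ["compare", "difference", "versus", "vs"]):
--         return base_message + """
--         - Structured as a clear comparison
--         - Highlighting key differences and similarities
--         - Using bullet points or tables when appropriate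
--         - Balanced in presenting all sides
--         Always maintain objectivity and cite specific information from the context.
--         """
--
--     elif any(word in query for word in ["summarize", "overview", "brief"]):
--         return base_message + """
--         - Concise and to the point
--         - Covering the main ideas only
--         - Organized in a logical flow
--         - Highlighting key takeaways
--         Focus on providing a high-level understanding while maintaining accuracy.
--         """
--
--     elif any(word in query for word in ["explain", "how", "why"]):
--         return base_message + """
--         - Detailed and thorough
--         - Using clear explanations
--         - Including relevant examples
--         - Breaking down complex concepts
--         Ensure the explanation is clear and builds understanding progressively.
--         """
--
--     elif any(word in query for word in ["list", "what are", "examples"]):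
--         return base_message + """
--         - Organized in a clear list format
--         - Using bullet points or numbering
--         - Providing brief explanations for each item
--         - Ensuring completeness
--         Present the information in an easily scannable format.
--         """
--
--     else:
--         return base_message + """
--         - Clear and direct
--         - Well-structured
--         - Supported by the context
--         - Professional in tone
--         Always base your response on the provided context and maintain accuracy.
--         """
-- ===== SOURCE B (Python) =====
-- _BASE = (
--     "You are a helpful AI assistant that provides accurate and relevant "
--     "information based on the given context. "
--     "Your responses should be:"
-- )
--
-- # Flat keyword -> category index map; category 4 is the default.
-- _KEYWORD_CATEGORY = {
--     "compare": 0, "difference": 0, "versus": 0, "vs": 0,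
--     "summarize": 1, "overview": 1, "brief": 1,
--     "explain": 2, "how": 2, "why": 2,
--     "list": 3, "what are": 3, "examples": 3,
-- }
--
-- _SUFFIXES = [
--     """
--         - Structured as a clear comparison
--         - Highlighting key differences and similarities
--         - Using bullet points or tables when appropriate
--         - Balanced in presenting all sides
--         Always maintain objectivity and cite specific information from the context.
--         """,
--     """
--         - Concise and to the point
--         - Covering the main ideas only
--         - Organized in a logical flow
--         - Highlighting key takeaways
--         Focus on providing a high-level understanding while maintaining accuracy.
--         """,
--     """
--         - Detailed and thorough
--         - Using clear explanations
--         - Including relevant examples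
--         - Breaking down complex concepts
--         Ensure the explanation is clear and builds understanding progressively.
--         """,
--     """
--         - Organized in a clear list format
--         - Using bullet points or numbering
--         - Providing brief explanations for each item
--         - Ensuring completeness
--         Present the information in an easily scannable format.
--         """,
--     """
--         - Clear and direct
--         - Well-structured
--         - Supported by the context
--         - Professional in tone
--         Always base your response on the provided context and maintain accuracy.
--         """,
-- ]
--
--
-- def generate_system_message(query: str) -> str:
--     q = query.lower()
--     # The first group matched by A's if/elif chain is exactly the group of
--     # minimal index among all matching keywords, so compute that minimum.
--     cat = min((c for w, c in _KEYWORD_CATEGORY.items() if w in q), default=4)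
--     return _BASE + _SUFFIXES[cat]
-- ===== Notes on version B (the rewrite author's own statement) =====
-- stated objective: alternative
-- what changed: Replaces the five-way if/elif chain by a flat keyword-to-category-index map: B computes the minimum category index among all matching keywords (default 4) and indexes a suffix table, instead of testing keyword groups sequentially with short-circuiting.
import Mathlib
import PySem

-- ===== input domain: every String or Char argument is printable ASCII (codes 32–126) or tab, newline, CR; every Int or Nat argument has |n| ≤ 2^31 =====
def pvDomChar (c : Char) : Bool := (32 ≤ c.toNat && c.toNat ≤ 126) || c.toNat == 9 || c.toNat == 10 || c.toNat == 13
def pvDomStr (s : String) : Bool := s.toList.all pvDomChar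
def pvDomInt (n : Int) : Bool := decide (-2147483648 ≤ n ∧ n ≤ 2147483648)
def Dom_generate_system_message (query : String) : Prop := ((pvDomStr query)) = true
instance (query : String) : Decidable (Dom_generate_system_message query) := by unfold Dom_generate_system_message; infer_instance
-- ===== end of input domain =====

-- B replaces A's if/elif chain by a flat keyword→category map: it takes the minimum
-- category index among matching keywords and indexes a suffix table (objective: alternative).

-- ===== PORT A =====
def generate_system_message (query : String) : String :=
  let base := "You are a helpful AI assistant that provides accurate and relevant information based on the given context. Your responses should be:"
  if (["compare", "difference", "versus", "vs"]).any (fun w => PySem.Str.isIn w (PySem.Str.lower query)) then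
    base ++ "\n        - Structured as a clear comparison\n        - Highlighting key differences and similarities\n        - Using bullet points or tables when appropriate\n        - Balanced in presenting all sides\n        Always maintain objectivity and cite specific information from the context.\n        "
  else if (["summarize", "overview", "brief"]).any (fun w => PySem.Str.isIn w (PySem.Str.lower query)) then
    base ++ "\n        - Concise and to the point\n        - Covering the main ideas only\n        - Organized in a logical flow\n        - Highlighting key takeaways\n        Focus on providing a high-level understanding while maintaining accuracy.\n        "
  else if (["explain", "how", "why"]).any (fun w => PySem.Str.isIn w (PySem.Str.lower query)) then
    base ++ "\n        - Detailed and thorough\n        - Using clear explanations\n        - Including relevant examples\n        - Breaking down complex concepts\n        Ensure the explanation is clear and builds understanding progressively.\n        "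
  else if (["list", "what are", "examples"]).any (fun w => PySem.Str.isIn w (PySem.Str.lower query)) then
    base ++ "\n        - Organized in a clear list format\n        - Using bullet points or numbering\n        - Providing brief explanations for each item\n        - Ensuring completeness\n        Present the information in an easily scannable format.\n        "
  else
    base ++ "\n        - Clear and direct\n        - Well-structured\n        - Supported by the context\n        - Professional in tone\n        Always base your response on the provided context and maintain accuracy.\n        "

-- ===== PORT B =====
def pvBase : String := "You are a helpful AI assistant that provides accurate and relevant information based on the given context. Your responses should be:"

-- flat keyword → category-index map (Python dict _KEYWORD_CATEGORY, insertion order)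
def pvKeywordCategory : List (String × Nat) :=
  [ ("compare", 0), ("difference", 0), ("versus", 0), ("vs", 0),
    ("summarize", 1), ("overview", 1), ("brief", 1),
    ("explain", 2), ("how", 2), ("why", 2),
    ("list", 3), ("what are", 3), ("examples", 3) ]

def pvSuffixes : List String :=
  [ "\n        - Structured as a clear comparison\n        - Highlighting key differences and similarities\n        - Using bullet points or tables when appropriate\n        - Balanced in presenting all sides\n        Always maintain objectivity and cite specific information from the context.\n        ",
    "\n        - Concise and to the point\n        - Covering the main ideas only\n        - Organized in a logical flow\n        - Highlighting key takeaways\n        Focus on providing a high-level understanding while maintaining accuracy.\n        ",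
    "\n        - Detailed and thorough\n        - Using clear explanations\n        - Including relevant examples\n        - Breaking down complex concepts\n        Ensure the explanation is clear and builds understanding progressively.\n        ",
    "\n        - Organized in a clear list format\n        - Using bullet points or numbering\n        - Providing brief explanations for each item\n        - Ensuring completeness\n        Present the information in an easily scannable format.\n        ",
    "\n        - Clear and direct\n        - Well-structured\n        - Supported by the context\n        - Professional in tone\n        Always base your response on the provided context and maintain accuracy.\n        " ]

-- min((c for w,c in items if w in q), default=4): fold keeping the minimum category index
def pvMinCat (q : String) : Nat :=
  pvKeywordCategory.foldl (fun m wc => if PySem.Str.isIn wc.1 q then min m wc.2 else m) 4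

def generate_system_message_alt (query : String) : String :=
  let cat := pvMinCat (PySem.Str.lower query)
  -- cat is always ≤ 4, so this list index never misses
  pvBase ++ pvSuffixes.getD cat ""

-- ===== PRECONDITION & SPEC =====
def Spec_generate_system_message (query : String) (out : String) : Prop := out = generate_system_message_alt query
instance (query : String) (out : String) : Decidable (Spec_generate_system_message query out) := by unfold Spec_generate_system_message; infer_instance

-- ===== CLAIM (what is proved, stated in full; the proofs are below) =====
def Claim_equal_generate_system_message : Prop := ∀ (query : String), Dom_generate_system_message query → Spec_generate_system_message query (generate_system_message query)

-- ===== LEMMAS AND PROOFS =====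

set_option maxRecDepth 20000 in
-- generic fact: minimum over the flagged flat list = index of the first group with a set flag
theorem pvMinAux (b0 b1 b2 b3 b4 b5 b6 b7 b8 b9 b10 b11 b12 : Bool) :
    ([(b0, 0), (b1, 0), (b2, 0), (b3, 0), (b4, 1), (b5, 1), (b6, 1),
      (b7, 2), (b8, 2), (b9, 2), (b10, 3), (b11, 3), (b12, 3)] : List (Bool × Nat)).foldl
        (fun m wc => if wc.1 then min m wc.2 else m) 4 =
      (if b0 || (b1 || (b2 || b3)) then 0
       else if b4 || (b5 || b6) then 1
       else if b7 || (b8 || b9) then 2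
       else if b10 || (b11 || b12) then 3
       else 4) := by
  revert b0 b1 b2 b3 b4 b5 b6 b7 b8 b9 b10 b11 b12
  decide

set_option maxRecDepth 20000 in
set_option maxHeartbeats 1000000 in
-- the minimum over the flat map equals the index of the first matching group of A's chain
theorem pvMinCat_eq (q : String) :
    pvMinCat q =
      (if (["compare", "difference", "versus", "vs"]).any (fun w => PySem.Str.isIn w q) then 0
       else if (["summarize", "overview", "brief"]).any (fun w => PySem.Str.isIn w q) then 1
       else if (["explain", "how", "why"]).any (fun w => PySem.Str.isIn w q) then 2
       else if (["list", "what are", "examples"]).any (fun w => PySem.Str.isIn w q) then 3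
       else 4) := by
  have h := pvMinAux (PySem.Str.isIn "compare" q) (PySem.Str.isIn "difference" q)
    (PySem.Str.isIn "versus" q) (PySem.Str.isIn "vs" q) (PySem.Str.isIn "summarize" q)
    (PySem.Str.isIn "overview" q) (PySem.Str.isIn "brief" q) (PySem.Str.isIn "explain" q)
    (PySem.Str.isIn "how" q) (PySem.Str.isIn "why" q) (PySem.Str.isIn "list" q)
    (PySem.Str.isIn "what are" q) (PySem.Str.isIn "examples" q)
  simp only [List.foldl] at h
  simp only [pvMinCat, pvKeywordCategory, List.foldl, List.any_cons, List.any_nil,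
    Bool.or_false]
  exact h

-- ===== VERDICT (by name: the statement is the Claim_ definition above) =====
set_option maxRecDepth 20000 in
set_option maxHeartbeats 1000000 in
theorem generate_system_message_spec : Claim_equal_generate_system_message := by
  intro query _
  unfold Spec_generate_system_message generate_system_message generate_system_message_alt
  rw [pvMinCat_eq]
  split_ifs <;> rfl
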